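-- pv_equiv track=rewrite | github.com/kmcentush/aoc_2023 | src/aoc/day17/puzzle.py | minimal_heat
-- ===== SOURCE A (Python) =====
-- import heapq
--
-- def minimal_heat(costs: list[list[int]], start: tuple[int, int], end: tuple[int, int], least: int, most: int) -> int:
--     """This is a somewhat bruce-force approach."""
--     num_rows = len(costs)
--     num_cols = len(costs[0])
--     queue = [(0, start, (0, 0))]
--     seen = set()
--     while queue:
--         # Get setup
--         total_heat, node, prev_direction = heapq.heappop(queue)
--
--         # Break at destination; heap ensures minimal heat is processed first
--         if node == end:
--             return total_heat
--
--         # Check if already seen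
--         if (node, prev_direction) in seen:
--             continue
--         seen.add((node, prev_direction))
--
--         # Consider turning only
--         for direction in {(1, 0), (0, 1), (-1, 0), (0, -1)} - {
--             prev_direction,
--             (-prev_direction[0], -prev_direction[1]),
--         }:
--             # Move multiple times in a straight line after turning
--             new_node, heat = node, total_heat
--             for i in range(1, most + 1):
--                 new_node = new_node[0] + direction[0], new_node[1] + direction[1]
--                 if 0 <= new_node[0] < num_rows and 0 <= new_node[1] < num_cols:
--                     heat += costs[new_node[0]][new_node[1]]
--                     if i >= least:
--                         heapq.heappush(queue, (heat, new_node, direction))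
--
--     return -1
-- ===== SOURCE B (Python) =====
-- _DIRS = ((1, 0), (0, 1), (-1, 0), (0, -1))
--
--
-- def _run_states(costs, num_rows, num_cols, heat, node, prev_dir, least, most):
--     """All states reachable from `node` by turning and then running 1..most cells,
--     addressing the run cells by closed-form offsets from `node`."""
--     states = []
--     for d in _DIRS:
--         if d == prev_dir or (d[0] == -prev_dir[0] and d[1] == -prev_dir[1]):
--             continue
--         h = heat
--         for i in range(1, most + 1):
--             r, c = node[0] + i * d[0], node[1] + i * d[1]
--             if 0 <= r < num_rows and 0 <= c < num_cols:
--                 h += costs[r][c]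
--                 if i >= least:
--                     states.append((h, (r, c), d))
--     return states
--
--
-- def _ordered_insert(frontier, state):
--     """Insert `state` into the ascending frontier list (after equal entries)."""
--     i = 0
--     while i < len(frontier) and frontier[i] <= state:
--         i += 1
--     frontier.insert(i, state)
--
--
-- def minimal_heat(costs: list[list[int]], start: tuple[int, int], end: tuple[int, int], least: int, most: int) -> int:
--     num_rows = len(costs)
--     num_cols = len(costs[0])
--     frontier = [(0, start, (0, 0))]
--     seen = set()
--     while frontier:
--         total_heat, node, prev_dir = frontier.pop(0)
--         if node == end:
--             return total_heat
--         if (node, prev_dir) in seen: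
--             continue
--         seen.add((node, prev_dir))
--         for state in _run_states(costs, num_rows, num_cols, total_heat, node, prev_dir, least, most):
--             _ordered_insert(frontier, state)
--     return -1
-- ===== Notes on version B (the rewrite author's own statement) =====
-- stated objective: alternative
-- what changed: Replaces A's heapq binary heap by an insertion-sorted frontier list popped at the front, and moves successor generation into a helper that addresses each run cell by a closed-form offset i*d from the turn node instead of A's incremental stepping; the direction set-difference becomes explicit skip guards.
-- outside the precondition, e.g. on minimal_heat([[1, 2], [3]], (0, 0), (1, 1), 3, 3): A returns -1, B returns -1
import Mathlib
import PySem

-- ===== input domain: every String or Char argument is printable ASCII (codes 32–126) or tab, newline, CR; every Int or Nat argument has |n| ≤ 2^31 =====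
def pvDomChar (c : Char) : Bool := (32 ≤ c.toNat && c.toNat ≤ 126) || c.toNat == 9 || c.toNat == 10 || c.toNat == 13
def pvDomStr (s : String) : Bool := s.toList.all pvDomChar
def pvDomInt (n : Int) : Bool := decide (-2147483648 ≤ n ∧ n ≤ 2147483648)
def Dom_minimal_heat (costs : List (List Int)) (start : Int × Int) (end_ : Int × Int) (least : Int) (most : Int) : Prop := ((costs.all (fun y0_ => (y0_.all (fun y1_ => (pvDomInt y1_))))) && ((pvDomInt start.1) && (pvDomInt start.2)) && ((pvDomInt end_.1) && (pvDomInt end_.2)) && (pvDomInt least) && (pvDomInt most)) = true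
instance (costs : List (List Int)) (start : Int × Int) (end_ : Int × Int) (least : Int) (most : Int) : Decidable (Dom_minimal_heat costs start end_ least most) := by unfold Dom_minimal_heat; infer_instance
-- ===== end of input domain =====

-- B replaces A's binary heap by an insertion-sorted frontier list popped at the front and
-- generates each turn's run of states in a helper addressing cells by closed-form offsets
-- (objective: alternative data structure/decomposition, same return value).

-- A queue/frontier entry (total_heat, node, direction), compared like a Python tuple.
abbrev PState : Type := Int × (Int × Int) × (Int × Int)

-- Python's lexicographic `<` on (int, (int, int), (int, int)) tuples.
def pvLt (a b : PState) : Bool :=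
  a.1 < b.1 || (a.1 == b.1 && (a.2.1.1 < b.2.1.1 || (a.2.1.1 == b.2.1.1 &&
    (a.2.1.2 < b.2.1.2 || (a.2.1.2 == b.2.1.2 && (a.2.2.1 < b.2.2.1 ||
      (a.2.2.1 == b.2.2.1 && a.2.2.2 < b.2.2.2)))))))

-- Fuel bound for the while loops (a port artifact: an upper bound on the number of pops;
-- each of the ≤ 5·rows·cols (node, prev_direction) states is expanded once, pushing ≤ 4·most entries).
def pvFuel (costs : List (List Int)) (most : Int) : Nat :=
  1 + 5 * costs.length * (PySem.List.pyGetD costs 0 []).length * (4 * most.toNat + 1)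

-- ===== PORT A =====

-- the four candidate directions {(1,0),(0,1),(-1,0),(0,-1)} (a literal set of tuples; iteration
-- order of the Python set does not affect the returned value, the port fixes this order)
def pvDirs : List (Int × Int) := [(1, 0), (0, 1), (-1, 0), (0, -1)]

-- A's inner loop: "move multiple times in a straight line after turning", walking incrementally,
-- collecting the entries A pushes (heapq is ported by its contract: the heap is the multiset of
-- pushed entries and pop returns its minimum, which is exact for the returned value).
-- one step of A's inner loop (the loop body as a helper)
def pvStepA (costs : List (List Int)) (nr nc least : Int) (d : Int × Int)
    (st : (Int × Int) × Int × List PState) (i : Int) : (Int × Int) × Int × List PState :=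
  let nn : Int × Int := (st.1.1 + d.1, st.1.2 + d.2)
  if 0 ≤ nn.1 ∧ nn.1 < nr ∧ 0 ≤ nn.2 ∧ nn.2 < nc then
    let h := st.2.1 + PySem.List.pyGetD (PySem.List.pyGetD costs nn.1 []) nn.2 0
    (nn, h, if least ≤ i then st.2.2 ++ [(h, nn, d)] else st.2.2)
  else (nn, st.2.1, st.2.2)

def pvRunA (costs : List (List Int)) (nr nc : Int) (node : Int × Int) (heat least most : Int)
    (d : Int × Int) : List PState :=
  ((PySem.List.pyRange 1 (most + 1)).foldl (pvStepA costs nr nc least d)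
    (node, heat, ([] : List PState))).2.2

-- A's "consider turning only" loop over the direction set difference
def pvPushesA (costs : List (List Int)) (nr nc : Int) (node : Int × Int) (heat least most : Int)
    (prev : Int × Int) : List PState :=
  (pvDirs.filter (fun d => !(d == prev) && !(d == (-prev.1, -prev.2)))).foldl
    (fun acc d => acc ++ pvRunA costs nr nc node heat least most d) []

-- heappop ported by contract: the popped entry is the minimum of the heap's contents
def pvMin (x : PState) (xs : List PState) : PState :=
  xs.foldl (fun m y => if pvLt y m then y else m) x

-- A's while loop
def pvLoopA (costs : List (List Int)) (nr nc : Int) (end_ : Int × Int) (least most : Int) :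
    Nat → List PState → PySem.Set ((Int × Int) × (Int × Int)) → Int
  | 0, _, _ => -1
  | _ + 1, [], _ => -1
  | fuel + 1, q :: qs, seen =>
    let m := pvMin q qs
    let rest := (q :: qs).erase m
    if m.2.1 = end_ then m.1
    else if PySem.Set.contains seen (m.2.1, m.2.2) then
      pvLoopA costs nr nc end_ least most fuel rest seen
    else
      pvLoopA costs nr nc end_ least most fuel
        (rest ++ pvPushesA costs nr nc m.2.1 m.1 least most m.2.2)
        (PySem.Set.add seen (m.2.1, m.2.2))

def minimal_heat (costs : List (List Int)) (start : Int × Int) (end_ : Int × Int) (least : Int) (most : Int) : Int :=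
  let nr : Int := costs.length
  let nc : Int := (PySem.List.pyGetD costs 0 []).length
  pvLoopA costs nr nc end_ least most (pvFuel costs most) [(0, start, (0, 0))] []

-- ===== PORT B =====

-- Source B's inner run loop for one direction: run cells at closed-form offsets i*d from node
def pvRunBDir (costs : List (List Int)) (nr nc : Int) (node : Int × Int) (least : Int)
    (d : Int × Int) : Int → List Int → List PState
  | _, [] => []
  | h, i :: is =>
    let r := node.1 + i * d.1
    let c := node.2 + i * d.2
    if 0 ≤ r ∧ r < nr ∧ 0 ≤ c ∧ c < nc then
      let h' := h + PySem.List.pyGetD (PySem.List.pyGetD costs r []) c 0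
      (if least ≤ i then [(h', (r, c), d)] else []) ++ pvRunBDir costs nr nc node least d h' is
    else
      pvRunBDir costs nr nc node least d h is

-- Source B's _run_states
def pvRunStates (costs : List (List Int)) (nr nc : Int) (heat : Int) (node : Int × Int)
    (prev : Int × Int) (least most : Int) : List PState :=
  pvDirs.foldl
    (fun acc d =>
      if d == prev || (d.1 == -prev.1 && d.2 == -prev.2) then acc
      else acc ++ pvRunBDir costs nr nc node least d heat (PySem.List.pyRange 1 (most + 1)))
    []

-- Source B's _ordered_insert (the while loop as structural recursion on the frontier)
def pvInsert (x : PState) : List PState → List PState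
  | [] => [x]
  | y :: ys => if pvLt x y then x :: y :: ys else y :: pvInsert x ys

-- Source B's while loop: pop the front of the ascending frontier
def pvLoopB (costs : List (List Int)) (nr nc : Int) (end_ : Int × Int) (least most : Int) :
    Nat → List PState → PySem.Set ((Int × Int) × (Int × Int)) → Int
  | 0, _, _ => -1
  | _ + 1, [], _ => -1
  | fuel + 1, s :: rest, seen =>
    if s.2.1 = end_ then s.1
    else if PySem.Set.contains seen (s.2.1, s.2.2) then
      pvLoopB costs nr nc end_ least most fuel rest seen
    else
      pvLoopB costs nr nc end_ least most fuel
        ((pvRunStates costs nr nc s.1 s.2.1 s.2.2 least most).foldl (fun f x => pvInsert x f) rest)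
        (PySem.Set.add seen (s.2.1, s.2.2))

def minimal_heat_alt (costs : List (List Int)) (start : Int × Int) (end_ : Int × Int) (least : Int) (most : Int) : Int :=
  let nr : Int := costs.length
  let nc : Int := (PySem.List.pyGetD costs 0 []).length
  pvLoopB costs nr nc end_ least most (pvFuel costs most) [(0, start, (0, 0))] []

-- ===== PRECONDITION & SPEC =====
-- pvTouch: the first straight run from `start` can enter the nr×nc grid rectangle
-- (interval overlap along each axis; every cost access of A happens on such a run)
def pvTouch (nr nc : Int) (start : Int × Int) (most : Int) : Prop :=
  (0 ≤ start.1 ∧ start.1 < nr ∧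
    ((1 ≤ most ∧ start.2 ≤ nc - 2 ∧ -most ≤ start.2 ∧ 1 ≤ nc) ∨
     (1 ≤ most ∧ 1 ≤ start.2 ∧ start.2 - nc + 1 ≤ most ∧ 1 ≤ nc))) ∨
  (0 ≤ start.2 ∧ start.2 < nc ∧
    ((1 ≤ most ∧ start.1 ≤ nr - 2 ∧ -most ≤ start.1 ∧ 1 ≤ nr) ∨
     (1 ≤ most ∧ 1 ≤ start.1 ∧ start.1 - nr + 1 ≤ most ∧ 1 ≤ nr)))

-- Pre_ excludes the empty grid, on which A raises IndexError at len(costs[0]), and grids with a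
-- row shorter than row 0 when the search can actually enter the grid (it may then raise
-- IndexError on the short row); rows at least as long as row 0, an immediate start = end,
-- or a search that can never enter the rectangle are safe and admitted.
def Pre_minimal_heat (costs : List (List Int)) (start : Int × Int) (end_ : Int × Int) (least : Int) (most : Int) : Prop :=
  costs ≠ [] ∧
  ((∀ row ∈ costs, (costs.headD []).length ≤ row.length) ∨
   start = end_ ∨
   ¬ pvTouch costs.length (costs.headD []).length start most)
instance (costs : List (List Int)) (start : Int × Int) (end_ : Int × Int) (least : Int) (most : Int) : Decidable (Pre_minimal_heat costs start end_ least most) := by unfold Pre_minimal_heat pvTouch; infer_instance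

def pvWitness_minimal_heat : List (List Int) × (Int × Int) × (Int × Int) × Int × Int :=
  ([[1, 2], [3, 4]], (0, 0), (1, 1), 1, 3)

def Spec_minimal_heat (costs : List (List Int)) (start : Int × Int) (end_ : Int × Int) (least : Int) (most : Int) (out : Int) : Prop := out = minimal_heat_alt costs start end_ least most
instance (costs : List (List Int)) (start : Int × Int) (end_ : Int × Int) (least : Int) (most : Int) (out : Int) : Decidable (Spec_minimal_heat costs start end_ least most out) := by unfold Spec_minimal_heat; infer_instance

-- ===== CLAIM (what is proved, stated in full; the proofs are below) =====
def Claim_equal_minimal_heat : Prop := ∀ (costs : List (List Int)) (start : Int × Int) (end_ : Int × Int) (least : Int) (most : Int), Dom_minimal_heat costs start end_ least most → Pre_minimal_heat costs start end_ least most → Spec_minimal_heat costs start end_ least most (minimal_heat costs start end_ least most)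

-- ===== LEMMAS AND PROOFS =====

-- the ascending-sorted predicate for B's frontier: no later entry is below an earlier one
def pvSorted (l : List PState) : Prop := List.Pairwise (fun a b => pvLt b a = false) l

lemma pvLt_irrefl (a : PState) : pvLt a a = false := by
  obtain ⟨a1, ⟨a2, a3⟩, a4, a5⟩ := a
  simp [pvLt]

lemma pvLt_asymm {a b : PState} (h : pvLt a b = true) : pvLt b a = false := by
  obtain ⟨a1, ⟨a2, a3⟩, a4, a5⟩ := a
  obtain ⟨b1, ⟨b2, b3⟩, b4, b5⟩ := b
  simp only [pvLt, Bool.or_eq_true, Bool.and_eq_true, decide_eq_true_eq, beq_iff_eq,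
    Bool.eq_false_iff, ne_eq] at h ⊢
  omega

lemma pvLt_antisymm {a b : PState} (h1 : pvLt a b = false) (h2 : pvLt b a = false) : a = b := by
  obtain ⟨a1, ⟨a2, a3⟩, a4, a5⟩ := a
  obtain ⟨b1, ⟨b2, b3⟩, b4, b5⟩ := b
  simp only [pvLt, Bool.eq_false_iff, ne_eq, Bool.or_eq_true, Bool.and_eq_true,
    decide_eq_true_eq, beq_iff_eq, Prod.mk.injEq] at h1 h2 ⊢
  omega

-- a ≤ b (as ¬ b < a) combined with a strict step, in the two shapes the proofs need
lemma pvLt_le_lt {a b c : PState} (h1 : pvLt b a = false) (h2 : pvLt b c = true) : pvLt c a = false := by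
  obtain ⟨a1, ⟨a2, a3⟩, a4, a5⟩ := a
  obtain ⟨b1, ⟨b2, b3⟩, b4, b5⟩ := b
  obtain ⟨c1, ⟨c2, c3⟩, c4, c5⟩ := c
  simp only [pvLt, Bool.eq_false_iff, ne_eq, Bool.or_eq_true, Bool.and_eq_true,
    decide_eq_true_eq, beq_iff_eq] at h1 h2 ⊢
  omega

lemma pvLt_lt_le {a b c : PState} (h1 : pvLt c b = false) (h2 : pvLt a b = true) : pvLt c a = false := by
  obtain ⟨a1, ⟨a2, a3⟩, a4, a5⟩ := a
  obtain ⟨b1, ⟨b2, b3⟩, b4, b5⟩ := b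
  obtain ⟨c1, ⟨c2, c3⟩, c4, c5⟩ := c
  simp only [pvLt, Bool.eq_false_iff, ne_eq, Bool.or_eq_true, Bool.and_eq_true,
    decide_eq_true_eq, beq_iff_eq] at h1 h2 ⊢
  omega

lemma pvLt_le_le {a b c : PState} (h1 : pvLt b a = false) (h2 : pvLt c b = false) : pvLt c a = false := by
  obtain ⟨a1, ⟨a2, a3⟩, a4, a5⟩ := a
  obtain ⟨b1, ⟨b2, b3⟩, b4, b5⟩ := b
  obtain ⟨c1, ⟨c2, c3⟩, c4, c5⟩ := c
  simp only [pvLt, Bool.eq_false_iff, ne_eq, Bool.or_eq_true, Bool.and_eq_true,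
    decide_eq_true_eq, beq_iff_eq] at h1 h2 ⊢
  omega

-- pvMin is an element of the popped list and a lower bound for it
lemma pvMin_spec (xs : List PState) (x : PState) :
    pvMin x xs ∈ x :: xs ∧ pvLt x (pvMin x xs) = false ∧
      ∀ y ∈ xs, pvLt y (pvMin x xs) = false := by
  induction xs generalizing x with
  | nil => simp [pvMin, pvLt_irrefl]
  | cons z zs ih =>
    have hstep : pvMin x (z :: zs) = pvMin (if pvLt z x then z else x) zs := by
      simp [pvMin, List.foldl_cons]
    by_cases hzx : pvLt z x = true
    · rw [hstep, if_pos hzx]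
      obtain ⟨hmem, hle, hall⟩ := ih z
      refine ⟨?_, ?_, ?_⟩
      · exact List.mem_cons_of_mem _ hmem
      · exact pvLt_le_lt hle hzx
      · intro y hy
        rcases List.mem_cons.mp hy with rfl | hy
        · exact hle
        · exact hall y hy
    · rw [hstep, if_neg hzx]
      obtain ⟨hmem, hle, hall⟩ := ih x
      refine ⟨?_, hle, ?_⟩
      · rcases List.mem_cons.mp hmem with h | h
        · rw [h]; exact List.mem_cons_self
        · exact List.mem_cons_of_mem _ (List.mem_cons_of_mem _ h)
      · intro y hy
        rcases List.mem_cons.mp hy with rfl | hy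
        · exact pvLt_le_le hle (Bool.eq_false_iff.mpr hzx)
        · exact hall y hy

-- membership through pvInsert
lemma pvInsert_mem {z x : PState} {l : List PState} (h : z ∈ pvInsert x l) : z = x ∨ z ∈ l := by
  induction l with
  | nil => simpa [pvInsert] using h
  | cons y ys ih =>
    by_cases hxy : pvLt x y = true
    · simpa [pvInsert, hxy] using h
    · simp only [pvInsert, if_neg hxy, List.mem_cons] at h
      rcases h with rfl | h
      · exact Or.inr (List.mem_cons_self)
      · rcases ih h with h | h
        · exact Or.inl h
        · exact Or.inr (List.mem_cons_of_mem _ h)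

lemma pvInsert_perm (x : PState) (l : List PState) : (pvInsert x l).Perm (x :: l) := by
  induction l with
  | nil => simp [pvInsert]
  | cons y ys ih =>
    by_cases hxy : pvLt x y = true
    · simp [pvInsert, hxy]
    · simp only [pvInsert, if_neg hxy]
      exact (List.Perm.cons y ih).trans (List.Perm.swap x y ys)

lemma pvInsert_sorted {l : List PState} (x : PState) (h : pvSorted l) : pvSorted (pvInsert x l) := by
  induction l with
  | nil => simp [pvInsert, pvSorted]
  | cons y ys ih =>
    rcases (List.pairwise_cons.mp h) with ⟨hy, hys⟩
    by_cases hxy : pvLt x y = true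
    · rw [pvInsert, if_pos hxy]
      refine List.pairwise_cons.mpr ⟨?_, h⟩
      intro z hz
      rcases List.mem_cons.mp hz with rfl | hz
      · exact pvLt_asymm hxy
      · exact pvLt_lt_le (hy z hz) hxy
    · rw [pvInsert, if_neg hxy]
      refine List.pairwise_cons.mpr ⟨?_, ih hys⟩
      intro z hz
      rcases pvInsert_mem hz with rfl | hz
      · exact Bool.eq_false_iff.mpr hxy
      · exact hy z hz

lemma foldl_insert_perm : ∀ (P f : List PState), (P.foldl (fun f x => pvInsert x f) f).Perm (f ++ P) := by
  intro P
  induction P with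
  | nil => intro f; simp
  | cons x P ih =>
    intro f
    have h1 : ((x :: P).foldl (fun f x => pvInsert x f) f) = P.foldl (fun f x => pvInsert x f) (pvInsert x f) := rfl
    rw [h1]
    refine (ih (pvInsert x f)).trans ?_
    refine (((pvInsert_perm x f).append_right P).trans ?_)
    exact List.perm_middle.symm

lemma foldl_insert_sorted : ∀ (P f : List PState), pvSorted f → pvSorted (P.foldl (fun f x => pvInsert x f) f) := by
  intro P
  induction P with
  | nil => intro f h; exact h
  | cons x P ih => intro f h; exact ih (pvInsert x f) (pvInsert_sorted x h)

-- A filters the direction list and appends each run; B walks the same list with a skip guard.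
lemma fold_guard_eq {α : Type} (p q : α → Bool) (f g : α → List PState)
    (hpq : ∀ d, q d = !p d) (hfg : ∀ d, f d = g d) :
    ∀ (l : List α) (acc : List PState),
      (l.filter p).foldl (fun a d => a ++ f d) acc
        = l.foldl (fun a d => if q d then a else a ++ g d) acc := by
  intro l
  induction l with
  | nil => intro acc; rfl
  | cons d l ih =>
    intro acc
    by_cases hp : p d = true
    · rw [List.filter_cons_of_pos hp]
      have hq : q d = false := by rw [hpq d, hp]; rfl
      simp only [List.foldl_cons, hq, Bool.false_eq_true, if_false, hfg d]
      exact ih _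
    · have hp' : p d = false := by simpa using hp
      rw [List.filter_cons_of_neg (by simp [hp'])]
      have hq : q d = true := by rw [hpq d, hp']; rfl
      simp only [List.foldl_cons, hq, if_true]
      exact ih _

-- A's incremental straight-line walk emits the same entries as B's closed-form-offset walk
lemma runA_go (costs : List (List Int)) (nr nc least : Int) (d node : Int × Int) :
    ∀ (k : Nat) (lo : Int) (cur : Int × Int) (h : Int) (acc : List PState),
      cur = (node.1 + (lo - 1) * d.1, node.2 + (lo - 1) * d.2) →
      ((PySem.List.pyRange lo (lo + (k : Int))).foldl (pvStepA costs nr nc least d) (cur, h, acc)).2.2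
        = acc ++ pvRunBDir costs nr nc node least d h (PySem.List.pyRange lo (lo + (k : Int))) := by
  intro k
  induction k with
  | zero =>
    intro lo cur h acc hcur
    have hnil : PySem.List.pyRange lo (lo + ((0 : Nat) : Int)) = [] := by
      simp [PySem.List.pyRange]
    rw [hnil]
    simp [pvRunBDir]
  | succ k ih =>
    intro lo cur h acc hcur
    subst hcur
    have hlt : lo < lo + ((k + 1 : Nat) : Int) := by push_cast; omega
    rw [PySem.List.pyRange_one_cons hlt]
    have hrange : lo + ((k + 1 : Nat) : Int) = (lo + 1) + ((k : Nat) : Int) := by push_cast; ring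
    rw [hrange]
    rw [List.foldl_cons]
    simp only [pvStepA, pvRunBDir]
    have e1 : node.1 + (lo - 1) * d.1 + d.1 = node.1 + lo * d.1 := by ring
    have e2 : node.2 + (lo - 1) * d.2 + d.2 = node.2 + lo * d.2 := by ring
    rw [e1, e2]
    by_cases hib : 0 ≤ node.1 + lo * d.1 ∧ node.1 + lo * d.1 < nr ∧
        0 ≤ node.2 + lo * d.2 ∧ node.2 + lo * d.2 < nc
    · rw [if_pos hib, if_pos hib]
      rw [ih (lo + 1) _ _ _ (by simp only [Prod.mk.injEq]; constructor <;> ring)]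
      split_ifs <;> simp
    · rw [if_neg hib, if_neg hib]
      exact ih (lo + 1) _ _ _ (by simp only [Prod.mk.injEq]; constructor <;> ring)

lemma runA_eq (costs : List (List Int)) (nr nc : Int) (node : Int × Int) (heat least most : Int)
    (d : Int × Int) :
    pvRunA costs nr nc node heat least most d
      = pvRunBDir costs nr nc node least d heat (PySem.List.pyRange 1 (most + 1)) := by
  by_cases hm : 0 ≤ most
  · have h1 : most + 1 = 1 + (most.toNat : Int) := by omega
    rw [pvRunA, h1]
    exact runA_go costs nr nc least d node most.toNat 1 node heat [] (by simp)
  · have h1 : PySem.List.pyRange 1 (most + 1) = [] := by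
      simp [PySem.List.pyRange]; omega
    rw [pvRunA, h1]
    simp [pvRunBDir]

lemma pushes_eq (costs : List (List Int)) (nr nc : Int) (node : Int × Int)
    (heat least most : Int) (prev : Int × Int) :
    pvPushesA costs nr nc node heat least most prev
      = pvRunStates costs nr nc heat node prev least most := by
  rw [pvPushesA, pvRunStates]
  refine fold_guard_eq _ _ _ _ ?_ ?_ pvDirs []
  · intro d
    obtain ⟨d1, d2⟩ := d
    obtain ⟨p1, p2⟩ := prev
    rw [Bool.eq_iff_iff]
    simp only [Bool.or_eq_true, Bool.and_eq_true, Bool.not_not, beq_iff_eq,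
      beq_eq_false_iff_ne, ne_eq, Prod.mk.injEq, Bool.not_and, Bool.not_eq_true]
  · intro d
    exact runA_eq costs nr nc node heat least most d

-- the main lockstep argument: A's heap and B's sorted frontier hold the same multiset,
-- so each iteration pops the same entry and pushes the same entries
lemma loop_eq (costs : List (List Int)) (nr nc : Int) (end_ : Int × Int) (least most : Int) :
    ∀ (fuel : Nat) (qA fB : List PState) (seen : PySem.Set ((Int × Int) × (Int × Int))),
      qA.Perm fB → pvSorted fB →
      pvLoopA costs nr nc end_ least most fuel qA seen
        = pvLoopB costs nr nc end_ least most fuel fB seen := by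
  intro fuel
  induction fuel with
  | zero => intro qA fB seen _ _; cases qA <;> cases fB <;> rfl
  | succ fuel ih =>
    intro qA fB seen hperm hsorted
    cases fB with
    | nil =>
      have : qA = [] := hperm.eq_nil
      subst this; rfl
    | cons s rest =>
      cases qA with
      | nil => simpa using hperm.symm.eq_nil
      | cons a as =>
        obtain ⟨hmem, hle, hall⟩ := pvMin_spec as a
        have hmin : ∀ y ∈ a :: as, pvLt y (pvMin a as) = false := by
          intro y hy
          rcases List.mem_cons.mp hy with h | h
          · subst h; exact hle
          · exact hall y h
        obtain ⟨hhead, htail⟩ := List.pairwise_cons.mp hsorted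
        have hms : pvMin a as = s := by
          have hmemB : pvMin a as ∈ s :: rest := hperm.mem_iff.mp hmem
          have hsA : s ∈ a :: as := hperm.mem_iff.mpr List.mem_cons_self
          rcases List.mem_cons.mp hmemB with h | h
          · exact h
          · exact pvLt_antisymm (hhead _ h) (hmin s hsA)
        have herase : ((a :: as).erase s).Perm rest := by
          have := List.Perm.erase s hperm
          rwa [List.erase_cons_head] at this
        show pvLoopA costs nr nc end_ least most (fuel + 1) (a :: as) seen
          = pvLoopB costs nr nc end_ least most (fuel + 1) (s :: rest) seen
        rw [pvLoopA, pvLoopB]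
        simp only [hms]
        by_cases hend : s.2.1 = end_
        · rw [if_pos hend, if_pos hend]
        · rw [if_neg hend, if_neg hend]
          by_cases hseen : PySem.Set.contains seen (s.2.1, s.2.2) = true
          · rw [if_pos hseen, if_pos hseen]
            exact ih _ _ _ herase htail
          · rw [if_neg hseen, if_neg hseen]
            refine ih _ _ _ ?_ ?_
            · rw [pushes_eq]
              exact (herase.append_right _).trans (foldl_insert_perm _ rest).symm
            · exact foldl_insert_sorted _ rest htail

-- ===== VERDICT (by name: the statement is the Claim_ definition above) =====
theorem minimal_heat_spec : Claim_equal_minimal_heat := by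
  intro costs start end_ least most _ _
  unfold Spec_minimal_heat minimal_heat minimal_heat_alt
  exact loop_eq _ _ _ _ _ _ _ _ _ _ (List.Perm.refl _) (by simp [pvSorted])
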